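-- pv_equiv track=rewrite | github.com/Denopia/haiku-maker | pos_evaluator.py | count_tag_groups
-- ===== SOURCE A (Python) =====
-- pos_tag_groups = {'nouns': ['NN','NNS','NNP','NNPS'],
--                   'verbs': ['VB','VBD','VBG','VBN','VBP','VBZ','MD'],
--                   'adjectives': ['JJ','JJR','JJS']}
--
-- def count_tag_groups(tags):
--     groups = {'all':0, 'nouns':0, 'verbs':0, 'adjectives':0, 'others':0}
--     for tag, count in tags.items():
--         if (tag in pos_tag_groups['nouns']):
--             groups['nouns'] = groups['nouns'] + count
--         elif (tag in pos_tag_groups['verbs']):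
--             groups['verbs'] = groups['verbs'] + count
--         elif (tag in pos_tag_groups['adjectives']):
--             groups['adjectives'] = groups['adjectives'] + count
--         else:
--             groups['others'] = groups['others'] + count
--         groups['all'] = groups['all'] + count
--     return groups
-- ===== SOURCE B (Python) =====
-- NOUNS = frozenset(('NN', 'NNS', 'NNP', 'NNPS'))
-- VERBS = frozenset(('VB', 'VBD', 'VBG', 'VBN', 'VBP', 'VBZ', 'MD'))
-- ADJECTIVES = frozenset(('JJ', 'JJR', 'JJS'))
--
-- def count_tag_groups(tags):
--     total = sum(tags.values())
--     nouns = sum(c for t, c in tags.items() if t in NOUNS)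
--     verbs = sum(c for t, c in tags.items() if t in VERBS)
--     adjectives = sum(c for t, c in tags.items() if t in ADJECTIVES)
--     return {'all': total,
--             'nouns': nouns,
--             'verbs': verbs,
--             'adjectives': adjectives,
--             'others': total - nouns - verbs - adjectives}
-- ===== Notes on version B (the rewrite author's own statement) =====
-- stated objective: alternative
-- what changed: Replaces the single loop with a five-way if/elif accumulator dict by four independent filtered sums (all, nouns, verbs, adjectives) and derives 'others' by subtraction instead of an else-branch.
import Mathlib
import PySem

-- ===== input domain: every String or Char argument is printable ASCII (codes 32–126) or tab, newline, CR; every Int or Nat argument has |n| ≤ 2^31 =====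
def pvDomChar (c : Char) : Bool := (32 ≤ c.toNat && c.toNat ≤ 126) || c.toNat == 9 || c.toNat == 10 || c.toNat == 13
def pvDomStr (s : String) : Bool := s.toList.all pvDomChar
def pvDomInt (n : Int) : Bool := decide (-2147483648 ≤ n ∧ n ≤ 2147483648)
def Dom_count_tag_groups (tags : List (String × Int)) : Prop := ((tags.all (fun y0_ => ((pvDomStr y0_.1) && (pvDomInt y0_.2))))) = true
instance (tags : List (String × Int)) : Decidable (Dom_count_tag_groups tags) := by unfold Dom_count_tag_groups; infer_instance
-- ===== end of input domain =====

-- B computes the four group totals as independent filtered sums and derives 'others' by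
-- subtraction, instead of A's single loop through a five-counter if/elif chain (alternative
-- decomposition, same O(n) cost).

-- ===== PORT A =====
def pvNouns : List String := ["NN", "NNS", "NNP", "NNPS"]
def pvVerbs : List String := ["VB", "VBD", "VBG", "VBN", "VBP", "VBZ", "MD"]
def pvAdjectives : List String := ["JJ", "JJR", "JJS"]

-- the 'groups' dict has five fixed keys; its state is ported as the tuple (all, nouns, verbs, adjectives, others)
def count_tag_groups (tags : List (String × Int)) : List (String × Int) :=
  let g : Int × Int × Int × Int × Int :=
    tags.foldl (fun (g : Int × Int × Int × Int × Int) (p : String × Int) =>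
      let (a, n, v, j, o) := g
      if p.1 ∈ pvNouns then (a + p.2, n + p.2, v, j, o)
      else if p.1 ∈ pvVerbs then (a + p.2, n, v + p.2, j, o)
      else if p.1 ∈ pvAdjectives then (a + p.2, n, v, j + p.2, o)
      else (a + p.2, n, v, j, o + p.2)) (0, 0, 0, 0, 0)
  [("all", g.1), ("nouns", g.2.1), ("verbs", g.2.2.1), ("adjectives", g.2.2.2.1), ("others", g.2.2.2.2)]

-- ===== PORT B =====
def count_tag_groups_alt (tags : List (String × Int)) : List (String × Int) :=
  let total := (tags.map Prod.snd).sum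
  let nouns := ((tags.filter (fun p => p.1 ∈ pvNouns)).map Prod.snd).sum
  let verbs := ((tags.filter (fun p => p.1 ∈ pvVerbs)).map Prod.snd).sum
  let adjectives := ((tags.filter (fun p => p.1 ∈ pvAdjectives)).map Prod.snd).sum
  [("all", total), ("nouns", nouns), ("verbs", verbs), ("adjectives", adjectives),
   ("others", total - nouns - verbs - adjectives)]

-- ===== PRECONDITION & SPEC =====
def Spec_count_tag_groups (tags : List (String × Int)) (out : List (String × Int)) : Prop := out = count_tag_groups_alt tags
instance (tags : List (String × Int)) (out : List (String × Int)) : Decidable (Spec_count_tag_groups tags out) := by unfold Spec_count_tag_groups; infer_instance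

-- ===== CLAIM (what is proved, stated in full; the proofs are below) =====
def Claim_equal_count_tag_groups : Prop := ∀ (tags : List (String × Int)), Dom_count_tag_groups tags → Spec_count_tag_groups tags (count_tag_groups tags)

-- ===== LEMMAS AND PROOFS =====

-- the three tag lists are pairwise disjoint
theorem pv_noun_not_verb (t : String) (h : t ∈ pvNouns) : t ∉ pvVerbs := by
  simp [pvNouns] at h
  rcases h with h | h | h | h <;> subst h <;> decide

theorem pv_noun_not_adj (t : String) (h : t ∈ pvNouns) : t ∉ pvAdjectives := by
  simp [pvNouns] at h
  rcases h with h | h | h | h <;> subst h <;> decide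

theorem pv_verb_not_adj (t : String) (h : t ∈ pvVerbs) : t ∉ pvAdjectives := by
  simp [pvVerbs] at h
  rcases h with h | h | h | h | h | h | h <;> subst h <;> decide

-- loop invariant: A's fold adds B's four filtered sums (and the complement) to the initial state
theorem pv_fold_eq (tags : List (String × Int)) (g : Int × Int × Int × Int × Int) :
    tags.foldl (fun (g : Int × Int × Int × Int × Int) (p : String × Int) =>
      let (a, n, v, j, o) := g
      if p.1 ∈ pvNouns then (a + p.2, n + p.2, v, j, o)
      else if p.1 ∈ pvVerbs then (a + p.2, n, v + p.2, j, o)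
      else if p.1 ∈ pvAdjectives then (a + p.2, n, v, j + p.2, o)
      else (a + p.2, n, v, j, o + p.2)) g =
    (g.1 + (tags.map Prod.snd).sum,
     g.2.1 + ((tags.filter (fun p => p.1 ∈ pvNouns)).map Prod.snd).sum,
     g.2.2.1 + ((tags.filter (fun p => p.1 ∈ pvVerbs)).map Prod.snd).sum,
     g.2.2.2.1 + ((tags.filter (fun p => p.1 ∈ pvAdjectives)).map Prod.snd).sum,
     g.2.2.2.2 + ((tags.map Prod.snd).sum
       - ((tags.filter (fun p => p.1 ∈ pvNouns)).map Prod.snd).sum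
       - ((tags.filter (fun p => p.1 ∈ pvVerbs)).map Prod.snd).sum
       - ((tags.filter (fun p => p.1 ∈ pvAdjectives)).map Prod.snd).sum)) := by
  induction tags generalizing g with
  | nil => simp
  | cons p rest ih =>
    obtain ⟨a, n, v, j, o⟩ := g
    by_cases hn : p.1 ∈ pvNouns
    · have hv := pv_noun_not_verb p.1 hn
      have hj := pv_noun_not_adj p.1 hn
      simp [List.foldl_cons, hn, hv, hj, ih]
      omega
    · by_cases hv : p.1 ∈ pvVerbs
      · have hj := pv_verb_not_adj p.1 hv
        simp [List.foldl_cons, hn, hv, hj, ih]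
        omega
      · by_cases hj : p.1 ∈ pvAdjectives
        · simp [List.foldl_cons, hn, hv, hj, ih]
          omega
        · simp [List.foldl_cons, hn, hv, hj, ih]
          omega

-- ===== VERDICT (by name: the statement is the Claim_ definition above) =====
theorem count_tag_groups_spec : Claim_equal_count_tag_groups := by
  intro tags _
  unfold Spec_count_tag_groups count_tag_groups count_tag_groups_alt
  simp [pv_fold_eq]
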